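-- pv_equiv track=rewrite | github.com/acanalatis/Func-iile-de-implementat | functii_de_implementat.py | frecventa_litere
-- ===== SOURCE A (Python) =====
-- def frecventa_litere(text):
--     frec = {}
--     for c in text:
--         if c != " ":
--             frec[c] = frec.get(c, 0) + 1
--     if not frec:
--         return "Nu există caractere"
--     return ", ".join(f"'{k}': {frec[k]}" for k in frec)
-- ===== SOURCE B (Python) =====
-- def frecventa_litere(text):
--     def go(chars):
--         if not chars:
--             return []
--         c = chars[0]
--         rest = [x for x in chars if x != c]
--         return [(c, len(chars) - len(rest))] + go(rest)
--     pairs = go([c for c in text if c != " "])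
--     if not pairs:
--         return "Nu există caractere"
--     return ", ".join(f"'{k}': {v}" for k, v in pairs)
-- ===== Notes on version B (the rewrite author's own statement) =====
-- stated objective: alternative
-- what changed: Replaces A's single pass that accumulates a counting dict with a count-and-remove recursion: repeatedly take the first remaining character, obtain its count as the length drop when all of its occurrences are filtered out, and recurse on the remaining characters.
import Mathlib
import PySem

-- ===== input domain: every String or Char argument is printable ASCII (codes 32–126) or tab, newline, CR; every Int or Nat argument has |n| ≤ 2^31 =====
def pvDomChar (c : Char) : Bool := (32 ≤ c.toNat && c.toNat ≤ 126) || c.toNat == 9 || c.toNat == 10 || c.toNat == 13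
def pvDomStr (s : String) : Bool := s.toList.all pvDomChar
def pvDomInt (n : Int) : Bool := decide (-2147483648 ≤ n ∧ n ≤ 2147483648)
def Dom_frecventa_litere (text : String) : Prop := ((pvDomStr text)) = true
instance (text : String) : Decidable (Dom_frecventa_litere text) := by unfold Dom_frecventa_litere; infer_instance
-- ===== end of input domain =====

-- B replaces A's single-pass counting dict by a count-and-remove recursion (take the first
-- remaining character, its count is the length drop when all its copies are filtered out,
-- recurse on the remainder): an alternative decomposition with the same result.

-- ===== PORT A =====
def pvFmtA (kv : Char × Int) : String :=
  "'" ++ String.singleton kv.1 ++ "': " ++ PySem.Int.toStr kv.2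
-- 'for k in frec: … frec[k]' iterates keys with their stored values: ported as the items list
def frecventa_litere (text : String) : String :=
  let frec := text.toList.foldl
    (fun d c => if c != ' ' then d.insert c (d.getD c 0 + 1) else d)
    (PySem.Dict.empty : PySem.Dict Char Int)
  if frec.items = [] then "Nu există caractere"
  else PySem.Str.join ", " (frec.items.map pvFmtA)

-- ===== PORT B =====
-- go(chars): head char c, rest = chars with every c removed, count of c = length drop
def pvGoB : List Char → List (Char × Int)
  | [] => []
  | c :: t =>
    let rest := (c :: t).filter (fun x => x != c)
    (c, ((c :: t).length : Int) - (rest.length : Int)) :: pvGoB rest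
  termination_by chars => chars.length
  decreasing_by
    have h : (t.filter (fun x => x != c)).length ≤ t.length := List.length_filter_le _ _
    simp [List.filter_cons, rest]
    omega

def frecventa_litere_alt (text : String) : String :=
  let pairs := pvGoB (text.toList.filter (fun c => c != ' '))
  if pairs = [] then "Nu există caractere"
  else PySem.Str.join ", " (pairs.map (fun kv => "'" ++ String.singleton kv.1 ++ "': " ++ PySem.Int.toStr kv.2))

-- ===== PRECONDITION & SPEC =====
def Spec_frecventa_litere (text : String) (out : String) : Prop := out = frecventa_litere_alt text
instance (text : String) (out : String) : Decidable (Spec_frecventa_litere text out) := by unfold Spec_frecventa_litere; infer_instance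

-- ===== CLAIM =====
def Claim_equal_frecventa_litere : Prop := ∀ (text : String), Dom_frecventa_litere text → Spec_frecventa_litere text (frecventa_litere text)

-- ===== LEMMAS AND PROOFS =====

theorem pv_foldl_if_filter {α β : Type} (p : α → Bool) (f : β → α → β) :
    ∀ (l : List α) (a : β),
      l.foldl (fun d c => if p c then f d c else d) a = (l.filter p).foldl f a := by
  intro l
  induction l with
  | nil => intro a; rfl
  | cons c t ih =>
    intro a
    by_cases h : p c = true
    · simp [h, ih]
    · simp [List.foldl, h, ih]

-- ordered dedup commutes with removing one value
theorem pv_ofList_filter_ne (c : Char) :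
    ∀ (l : List Char),
      PySem.Set.ofList (l.filter (fun x => x != c))
        = (PySem.Set.ofList l).filter (fun x => x != c) := by
  intro l
  induction l with
  | nil => rfl
  | cons a t ih =>
    rw [List.filter_cons]
    by_cases h : a = c
    · subst h
      simp only [bne_self_eq_false, if_false, Bool.false_eq_true, ite_false,
        PySem.Set.ofList_cons, ih, PySem.Set.discard, List.filter_filter]
      rw [List.filter_cons, if_neg (by simp)]
      rw [List.filter_filter]
      apply List.filter_congr
      intro x _
      simp [bne]
    · have hb : (a != c) = true := by simp [bne, h]
      rw [hb, if_pos rfl, PySem.Set.ofList_cons, PySem.Set.ofList_cons,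
        List.filter_cons, hb, if_pos rfl]
      congr 1
      simp only [PySem.Set.discard, ih, List.filter_filter]
      apply List.filter_congr
      intro x _
      simp [bne, Bool.and_comm]

-- count of a value ≠ c is unchanged by filtering out all copies of c
theorem pv_count_filter_ne (c k : Char) (hk : k ≠ c) (l : List Char) :
    (l.filter (fun x => x != c)).count k = l.count k := by
  induction l with
  | nil => rfl
  | cons a t ih =>
    rw [List.filter_cons]
    by_cases h : a = c
    · subst h
      simp [List.count_cons, ih, Ne.symm hk]
    · by_cases h2 : a = k <;> simp [List.count_cons, ih, h, h2, hk]

-- the count-and-remove recursion computes Counter(l).items()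
theorem pvGoB_eq_counter_items :
    ∀ (n : Nat) (l : List Char), l.length ≤ n →
      pvGoB l = (PySem.Set.ofList l).map (fun k => (k, (l.count k : Int))) := by
  intro n
  induction n with
  | zero =>
    intro l hl
    have h0 : l = [] := List.eq_nil_of_length_eq_zero (Nat.le_zero.mp hl)
    subst h0
    simp [pvGoB]
  | succ n ih =>
    intro l hl
    match l with
    | [] => simp [pvGoB]
    | c :: t =>
      simp only [pvGoB]
      have hrest : ((c :: t).filter (fun x => x != c)) = t.filter (fun x => x != c) := by
        simp [List.filter_cons]
      have hlen : (t.filter (fun x => x != c)).length ≤ n := by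
        have := List.length_filter_le (fun x => x != c) t
        simp at hl; omega
      rw [hrest, ih _ hlen, pv_ofList_filter_ne, PySem.Set.ofList_cons, List.map_cons]
      have hdisc : PySem.Set.discard (PySem.Set.ofList t) c
          = (PySem.Set.ofList t).filter (fun y => !(y == c)) := rfl
      rw [hdisc]
      refine congrArg₂ (· :: ·) ?_ ?_
      · refine congrArg (fun z => (c, z)) ?_
        have hsplit := List.length_eq_countP_add_countP (p := fun x => x == c) (l := t)
        have hcount : t.count c = List.countP (fun x => x == c) t := rfl
        have hflen : (t.filter (fun x => x != c)).length
            = List.countP (fun a => decide ¬(a == c) = true) t := by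
          rw [← List.countP_eq_length_filter]
          apply List.countP_congr
          intro x _
          simp [bne]
        simp only [List.length_cons, List.count_cons_self, hflen]
        push_cast
        omega
      · apply List.map_congr_left
        intro k hk
        have hkne : k ≠ c := by
          have := List.of_mem_filter hk
          simpa using this
        refine congrArg (fun z => (k, z)) ?_
        rw [pv_count_filter_ne c k hkne]
        simp [List.count_cons, Ne.symm hkne]

theorem frecventa_litere_eq_alt (text : String) :
    frecventa_litere text = frecventa_litere_alt text := by
  simp only [frecventa_litere, frecventa_litere_alt]
  rw [pv_foldl_if_filter (· != ' ') (fun (d : PySem.Dict Char Int) c => d.insert c (d.getD c 0 + 1)) text.toList]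
  rw [PySem.Dict.foldl_insert_getD_add_one_eq_counter]
  rw [PySem.Dict.items_counter]
  rw [pvGoB_eq_counter_items (text.toList.filter (· != ' ')).length _ le_rfl]
  rfl

-- ===== VERDICT =====
theorem frecventa_litere_spec : Claim_equal_frecventa_litere := by
  intro text _
  exact frecventa_litere_eq_alt text
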